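-- pv_equiv track=rewrite | github.com/jaanos/PSA1 | vaje/vaje11.py | sahovnica
-- ===== SOURCE A (Python) =====
-- def sahovnica(S):
--     """
--     Izbira nesosednjih polj šahovnice velikosti n × 4 z največjo vsoto.
--
--     Časovna zahtevnost: O(n)
--     """
--     n = len(S)
--     st = (0, 1, 2, 4, 5, 8, 9, 10)
--     z = {i: [j for j in st if (i & j) == 0] for i in st}
--     c = lambda r, j: sum(r[i] * ((j >> i) & 1) for i in range(4))
--     v = {(0, j): (c(S[0], j), None) for j in st}
--     for i in range(1, n):
--         for j in st:
--             s, p = max((v[i-1, k][0], k) for k in z[j])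
--             v[i, j] = (s + c(S[i], j), p)
--     s, p = max((v[n-1, j][0], j) for j in st)
--     res = []
--     for i in reversed(range(n)):
--         for j in reversed(range(4)):
--             if (p & (1 << j)) != 0:
--                 res.append((i, j))
--         p = v[i, p][1]
--     return s, list(reversed(res))
-- ===== SOURCE B (Python) =====
-- def sahovnica(S):
--     """
--     Izbira nesosednjih polj šahovnice velikosti n × 4 z največjo vsoto.
--
--     Forward DP over the 8 non-adjacent row masks that carries the selected
--     positions along with each sum, so no parent pointers and no backward
--     reconstruction pass are needed.
--     """
--     st = (0, 1, 2, 4, 5, 8, 9, 10)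
--     z = {i: [j for j in st if (i & j) == 0] for i in st}
--
--     def c(r, j):
--         return sum(r[i] * ((j >> i) & 1) for i in range(4))
--
--     def cells(i, j):
--         return [(i, k) for k in range(4) if (j >> k) & 1 != 0]
--
--     cur = {j: (c(S[0], j), cells(0, j)) for j in st}
--     for i in range(1, len(S)):
--         nxt = {}
--         for j in st:
--             s, k = max((cur[k][0], k) for k in z[j])
--             nxt[j] = (s + c(S[i], j), cur[k][1] + cells(i, j))
--         cur = nxt
--     s, j = max((cur[j][0], j) for j in st)
--     return s, cur[j][1]
-- ===== Notes on version B (the rewrite author's own statement) =====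
-- stated objective: simpler
-- what changed: B keeps the same forward DP over the 8 non-adjacent row masks but stores the accumulated list of selected positions in each table entry instead of a parent pointer, eliminating A's backward reconstruction pass.
import Mathlib
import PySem

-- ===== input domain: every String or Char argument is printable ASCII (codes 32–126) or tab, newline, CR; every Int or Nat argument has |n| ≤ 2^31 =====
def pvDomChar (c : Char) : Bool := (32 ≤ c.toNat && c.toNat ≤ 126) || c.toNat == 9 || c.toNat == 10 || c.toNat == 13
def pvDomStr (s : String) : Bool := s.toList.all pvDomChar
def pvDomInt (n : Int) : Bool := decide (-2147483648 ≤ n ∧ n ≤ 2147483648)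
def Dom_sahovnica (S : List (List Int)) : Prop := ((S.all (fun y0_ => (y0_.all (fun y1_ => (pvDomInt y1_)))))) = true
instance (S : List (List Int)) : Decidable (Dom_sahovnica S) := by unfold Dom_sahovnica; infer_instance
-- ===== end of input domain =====

-- B replaces A's parent-pointer table and backward reconstruction pass by a forward DP that
-- carries the selected positions along with each sum (objective: simpler decomposition).

-- ===== PORT A =====
-- st = (0, 1, 2, 4, 5, 8, 9, 10)
def pvStA : List Int := [0, 1, 2, 4, 5, 8, 9, 10]

-- z = {i: [j for j in st if (i & j) == 0] for i in st}
def pvZA : PySem.Dict Int (List Int) :=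
  pvStA.foldl (fun d i => d.insert i (pvStA.filter (fun j => PySem.Int.band i j == 0))) PySem.Dict.empty

-- c = lambda r, j: sum(r[i] * ((j >> i) & 1) for i in range(4))
-- (r[i] ported with default 0 for totality; Pre_ guarantees 4 ≤ len(r) so the default is never read)
def pvCA (r : List Int) (j : Int) : Int :=
  ((PySem.List.pyRange 0 4 1).map
    (fun i => PySem.List.pyGetD r i 0 * PySem.Int.band (j >>> i.toNat) 1)).foldl (· + ·) 0

-- v = {(0, j): (c(S[0], j), None) for j in st}   (S[0] with default [] for totality; Pre_: S ≠ [])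
def pvV0A (S : List (List Int)) : PySem.Dict (Int × Int) (Int × Option Int) :=
  pvStA.foldl (fun d j => d.insert ((0 : Int), j) (pvCA (PySem.List.pyGetD S 0 []) j, (none : Option Int)))
    PySem.Dict.empty

-- s, p = max((v[i-1, k][0], k) for k in z[j]);  entry written at (i, j) = (s + c(S[i], j), p)
def pvEntA (S : List (List Int)) (v : PySem.Dict (Int × Int) (Int × Option Int)) (i j : Int) :
    Int × Option Int :=
  let sp := (PySem.List.max2?
      ((pvZA.getD j []).map (fun k => ((v.getD (i - 1, k) ((0 : Int), (none : Option Int))).1, k)))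
      (·.1) (·.2)).getD (0, 0)
  (sp.1 + pvCA (PySem.List.pyGetD S i []) j, some sp.2)

-- inner loop 'for j in st: v[i, j] = …' of one row
def pvRowA (S : List (List Int)) (v : PySem.Dict (Int × Int) (Int × Option Int)) (i : Int) :
    PySem.Dict (Int × Int) (Int × Option Int) :=
  pvStA.foldl (fun w j => w.insert (i, j) (pvEntA S w i j)) v

-- one step of the reconstruction loop body (p read with default 0 for totality; inside Pre_ it is never None when read)
-- inner loop 'for j in reversed(range(4)): if (p & (1 << j)) != 0: res.append((i, j))'
def pvBits (p i : Int) (res0 : List (Int × Int)) : List (Int × Int) :=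
  (PySem.List.pyRange 3 (-1) (-1)).foldl
    (fun res j => if PySem.Int.band p (1 <<< j.toNat) != 0 then res ++ [(i, j)] else res) res0

def pvReconA (v : PySem.Dict (Int × Int) (Int × Option Int))
    (st : List (Int × Int) × Option Int) (i : Int) : List (Int × Int) × Option Int :=
  let p := st.2.getD 0
  let res := pvBits p i st.1
  (res, (v.getD (i, p) ((0 : Int), (none : Option Int))).2)

def sahovnica (S : List (List Int)) : Int × (List (Int × Int)) :=
  let n : Int := S.length
  let v := (PySem.List.pyRange 1 n 1).foldl (pvRowA S) (pvV0A S)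
  let fin := (PySem.List.max2?
      (pvStA.map (fun j => ((v.getD (n - 1, j) ((0 : Int), (none : Option Int))).1, j)))
      (·.1) (·.2)).getD (0, 0)
  let r := (PySem.List.pyRange (n - 1) (-1) (-1)).foldl (pvReconA v) ([], some fin.2)
  (fin.1, r.1.reverse)

-- ===== PORT B =====
def pvStB : List Int := [0, 1, 2, 4, 5, 8, 9, 10]

def pvZB : PySem.Dict Int (List Int) :=
  pvStB.foldl (fun d i => d.insert i (pvStB.filter (fun j => PySem.Int.band i j == 0))) PySem.Dict.empty

def pvCB (r : List Int) (j : Int) : Int :=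
  ((PySem.List.pyRange 0 4 1).map
    (fun i => PySem.List.pyGetD r i 0 * PySem.Int.band (j >>> i.toNat) 1)).foldl (· + ·) 0

-- cells(i, j) = [(i, k) for k in range(4) if (j >> k) & 1 != 0]
def pvCellsB (i j : Int) : List (Int × Int) :=
  ((PySem.List.pyRange 0 4 1).filter (fun k => PySem.Int.band (j >>> k.toNat) 1 != 0)).map
    (fun k => (i, k))

-- cur = {j: (c(S[0], j), cells(0, j)) for j in st}
def pvCur0B (S : List (List Int)) : PySem.Dict Int (Int × List (Int × Int)) :=
  pvStB.foldl (fun d j => d.insert j (pvCB (PySem.List.pyGetD S 0 []) j, pvCellsB 0 j))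
    PySem.Dict.empty

-- s, k = max((cur[k][0], k) for k in z[j]);  nxt[j] = (s + c(S[i], j), cur[k][1] + cells(i, j))
def pvEntB (S : List (List Int)) (cur : PySem.Dict Int (Int × List (Int × Int))) (i j : Int) :
    Int × List (Int × Int) :=
  let sk := (PySem.List.max2?
      ((pvZB.getD j []).map (fun k => ((cur.getD k ((0 : Int), ([] : List (Int × Int)))).1, k)))
      (·.1) (·.2)).getD (0, 0)
  (sk.1 + pvCB (PySem.List.pyGetD S i []) j,
   (cur.getD sk.2 ((0 : Int), ([] : List (Int × Int)))).2 ++ pvCellsB i j)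

def pvRowB (S : List (List Int)) (cur : PySem.Dict Int (Int × List (Int × Int))) (i : Int) :
    PySem.Dict Int (Int × List (Int × Int)) :=
  pvStB.foldl (fun nxt j => nxt.insert j (pvEntB S cur i j)) PySem.Dict.empty

def sahovnica_alt (S : List (List Int)) : Int × (List (Int × Int)) :=
  let cur := (PySem.List.pyRange 1 (S.length : Int) 1).foldl (pvRowB S) (pvCur0B S)
  let fin := (PySem.List.max2?
      (pvStB.map (fun j => ((cur.getD j ((0 : Int), ([] : List (Int × Int)))).1, j)))
      (·.1) (·.2)).getD (0, 0)
  (fin.1, (cur.getD fin.2 ((0 : Int), ([] : List (Int × Int)))).2)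

-- ===== PRECONDITION & SPEC =====
-- Pre_ excludes exactly the inputs where A raises: the empty board (IndexError on S[0])
-- and boards with a row of fewer than 4 entries (IndexError in c).
def Pre_sahovnica (S : List (List Int)) : Prop := S ≠ [] ∧ ∀ r ∈ S, 4 ≤ r.length
instance (S : List (List Int)) : Decidable (Pre_sahovnica S) := by unfold Pre_sahovnica; infer_instance

def pvWitness_sahovnica : List (List Int) := [[1, 2, 3, 4], [4, 3, 2, 1]]

def Spec_sahovnica (S : List (List Int)) (out : Int × (List (Int × Int))) : Prop := out = sahovnica_alt S
instance (S : List (List Int)) (out : Int × (List (Int × Int))) : Decidable (Spec_sahovnica S out) := by unfold Spec_sahovnica; infer_instance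

-- ===== CLAIM (what is proved, stated in full; the proofs are below) =====
def Claim_equal_sahovnica : Prop := ∀ (S : List (List Int)), Dom_sahovnica S → Pre_sahovnica S → Spec_sahovnica S (sahovnica S)

-- ===== LEMMAS AND PROOFS =====

-- model: value, chosen predecessor and accumulated cell list of the DP, per row (as Nat)
def mBest (f : Int → Int) (j : Int) : Int × Int :=
  (PySem.List.max2? ((pvZA.getD j []).map (fun k => (f k, k))) (·.1) (·.2)).getD (0, 0)

def mVal (S : List (List Int)) : Nat → Int → Int
  | 0, j => pvCA (PySem.List.pyGetD S 0 []) j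
  | r + 1, j => (mBest (fun k => mVal S r k) j).1 + pvCA (PySem.List.pyGetD S ((r : Int) + 1) []) j

def mPar (S : List (List Int)) (r : Nat) (j : Int) : Int := (mBest (fun k => mVal S r k) j).2

def mLst (S : List (List Int)) : Nat → Int → List (Int × Int)
  | 0, j => pvCellsB 0 j
  | r + 1, j => mLst S r (mPar S r j) ++ pvCellsB ((r : Int) + 1) j

theorem pvCB_eq : pvCB = pvCA := rfl
theorem pvZB_eq : pvZB = pvZA := rfl
theorem pvStB_eq : pvStB = pvStA := rfl

-- generic lemmas about foldl-insert loops
theorem fold_get_stable {κ ν : Type} [BEq κ] [LawfulBEq κ] (key : Int → κ) (g : Int → ν) :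
    ∀ (ks : List Int) (d : PySem.Dict κ ν) (q : κ), (∀ j ∈ ks, q ≠ key j) →
      (ks.foldl (fun d j => d.insert (key j) (g j)) d).get? q = d.get? q := by
  intro ks
  induction ks with
  | nil => intro d q _; rfl
  | cons a t ih =>
    intro d q h
    simp only [List.foldl_cons]
    rw [ih _ q (fun j hj => h j (by simp [hj]))]
    exact PySem.Dict.get?_insert_of_ne _ _ (h a (by simp))

theorem fold_get_new {κ ν : Type} [BEq κ] [LawfulBEq κ] (key : Int → κ)
    (hinj : ∀ a b, key a = key b → a = b) (g : Int → ν) :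
    ∀ (ks : List Int) (d : PySem.Dict κ ν) (j : Int), ks.Nodup → j ∈ ks →
      (ks.foldl (fun d j => d.insert (key j) (g j)) d).get? (key j) = some (g j) := by
  intro ks
  induction ks with
  | nil => intro d j _ h; cases h
  | cons a t ih =>
    intro d j hnd hj
    simp only [List.foldl_cons]
    rcases List.mem_cons.mp hj with rfl | hjt
    · rw [fold_get_stable key g t _ _ (fun k hk h => by cases hinj _ _ h; exact (List.nodup_cons.mp hnd).1 hk)]
      exact PySem.Dict.get?_insert_self _ _ _
    · exact ih _ j (List.nodup_cons.mp hnd).2 hjt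

-- the row loop of A only reads keys with first component i-1, so its accumulating body
-- may be replaced by a pure one reading the pre-row table
theorem rowA_aux (S : List (List Int)) (v : PySem.Dict (Int × Int) (Int × Option Int)) (i : Int) :
    ∀ (ks : List Int) (w : PySem.Dict (Int × Int) (Int × Option Int)),
      (∀ k : Int, w.getD (i - 1, k) ((0 : Int), (none : Option Int)) =
          v.getD (i - 1, k) ((0 : Int), (none : Option Int))) →
      ks.foldl (fun w j => w.insert (i, j) (pvEntA S w i j)) w =
        ks.foldl (fun w j => w.insert (i, j) (pvEntA S v i j)) w := by
  intro ks
  induction ks with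
  | nil => intro w _; rfl
  | cons a t ih =>
    intro w h
    simp only [List.foldl_cons]
    have hent : pvEntA S w i a = pvEntA S v i a := by
      simp only [pvEntA]
      have : (fun k => ((w.getD (i - 1, k) ((0 : Int), (none : Option Int))).1, k)) =
          (fun k : Int => ((v.getD (i - 1, k) ((0 : Int), (none : Option Int))).1, k)) :=
        funext fun k => by rw [h k]
      rw [this]
    rw [hent]
    exact ih _ (fun k => by
      rw [PySem.Dict.getD_insert_of_ne]
      · exact h k
      · intro heq
        have : i - 1 = i := congrArg Prod.fst heq
        omega)

theorem rowA_pure (S : List (List Int)) (v : PySem.Dict (Int × Int) (Int × Option Int)) (i : Int) :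
    pvRowA S v i = pvStA.foldl (fun w j => w.insert (i, j) (pvEntA S v i j)) v := by
  unfold pvRowA
  exact rowA_aux S v i pvStA v (fun _ => rfl)

-- max over the pair list built from ks picks some (f k, k), k ∈ ks
def m2step (acc : Option (Int × Int)) (x : Int × Int) : Option (Int × Int) :=
  match acc with
  | none => some x
  | some m =>
    if (decide (m.1 < x.1) || !decide (x.1 < m.1) && decide (m.2 < x.2)) = true then some x
    else some m

theorem max2?_eq_foldl (xs : List (Int × Int)) :
    PySem.List.max2? xs (·.1) (·.2) = xs.foldl m2step none := by
  unfold PySem.List.max2? m2step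
  congr 1
  funext acc x
  cases acc <;> rfl

theorem m2step_cases (a x : Int × Int) :
    m2step (some a) x = some a ∨ m2step (some a) x = some x := by
  unfold m2step
  by_cases h : (decide (a.1 < x.1) || !decide (x.1 < a.1) && decide (a.2 < x.2)) = true <;>
    simp [h]

theorem foldl_m2_aux (P : Int × Int → Prop) :
    ∀ (t : List (Int × Int)) (a : Int × Int), P a → (∀ x ∈ t, P x) →
      ∃ r, t.foldl m2step (some a) = some r ∧ P r := by
  intro t
  induction t with
  | nil => intro a ha _; exact ⟨a, rfl, ha⟩
  | cons b t ih =>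
    intro a ha hall
    rw [List.foldl_cons]
    rcases m2step_cases a b with h | h <;> rw [h]
    · exact ih a ha (fun x hx => hall x (by simp [hx]))
    · exact ih b (hall b (by simp)) (fun x hx => hall x (by simp [hx]))

theorem max2_map (f : Int → Int) (ks : List Int) (h : ks ≠ []) :
    ∃ k ∈ ks, PySem.List.max2? (ks.map (fun k => (f k, k))) (·.1) (·.2) = some (f k, k) := by
  cases ks with
  | nil => exact absurd rfl h
  | cons k0 t =>
    rw [max2?_eq_foldl]
    simp only [List.map_cons, List.foldl_cons]
    have h0 : m2step none (f k0, k0) = some (f k0, k0) := rfl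
    rw [h0]
    obtain ⟨r, hr, hP⟩ :=
      foldl_m2_aux (fun r => ∃ k ∈ k0 :: t, r = (f k, k)) (t.map (fun k => (f k, k)))
        (f k0, k0) ⟨k0, by simp, rfl⟩
        (by rintro x hx
            obtain ⟨k, hk, rfl⟩ := List.mem_map.mp hx
            exact ⟨k, by simp [hk], rfl⟩)
    obtain ⟨k, hk, rfl⟩ := hP
    exact ⟨k, hk, hr⟩

theorem z_facts : ∀ j ∈ pvStA, pvZA.getD j [] ≠ [] ∧ ∀ k ∈ pvZA.getD j [], k ∈ pvStA := by decide

theorem mBest_spec (f : Int → Int) (j : Int) (hj : j ∈ pvStA) :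
    (mBest f j).2 ∈ pvZA.getD j [] ∧ mBest f j = (f (mBest f j).2, (mBest f j).2) := by
  obtain ⟨k, hk, hmax⟩ := max2_map f (pvZA.getD j []) (z_facts j hj).1
  unfold mBest
  rw [hmax]
  exact ⟨hk, rfl⟩

theorem mBest_snd_mem (f : Int → Int) (j : Int) (hj : j ∈ pvStA) : (mBest f j).2 ∈ pvStA :=
  (z_facts j hj).2 _ (mBest_spec f j hj).1

-- invariant of B's forward loop
theorem invB (S : List (List Int)) (m : Nat) : ∀ j ∈ pvStB,
    ((PySem.List.pyRange 1 ((m : Int) + 1) 1).foldl (pvRowB S) (pvCur0B S)).get? j =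
      some (mVal S m j, mLst S m j) := by
  induction m with
  | zero =>
    intro j hj
    rw [show ((0 : Nat) : Int) + 1 = 1 by norm_num,
      PySem.List.pyRange_one_eq_nil le_rfl, List.foldl_nil]
    unfold pvCur0B
    rw [fold_get_new (fun j : Int => j) (fun _ _ h => h)
      (fun j => (pvCB (PySem.List.pyGetD S 0 []) j, pvCellsB 0 j)) pvStB PySem.Dict.empty j
      (by decide) hj]
    simp [mVal, mLst, pvCB_eq]
  | succ m ih =>
    intro j hj
    have hsplit : PySem.List.pyRange 1 (((m + 1 : Nat) : Int) + 1) 1 =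
        PySem.List.pyRange 1 ((m : Int) + 1) 1 ++ [(m : Int) + 1] := by
      push_cast
      exact PySem.List.pyRange_one_succ_right (by omega)
    rw [hsplit, List.foldl_append, List.foldl_cons, List.foldl_nil]
    set prev := (PySem.List.pyRange 1 ((m : Int) + 1) 1).foldl (pvRowB S) (pvCur0B S) with hprev
    unfold pvRowB
    rw [fold_get_new (fun j : Int => j) (fun _ _ h => h)
      (fun j => pvEntB S prev ((m : Int) + 1) j) pvStB PySem.Dict.empty j (by decide) hj]
    simp only [pvEntB]
    have hmapeq : (pvZB.getD j []).map
        (fun k => ((prev.getD k ((0 : Int), ([] : List (Int × Int)))).1, k)) =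
        (pvZA.getD j []).map (fun k => ((fun k => mVal S m k) k, k)) := by
      rw [pvZB_eq]
      refine List.map_congr_left (fun k hk => ?_)
      have hkst : k ∈ pvStB := (z_facts j (pvStB_eq ▸ hj)).2 k hk
      rw [PySem.Dict.getD_of_get?_eq_some prev ((0 : Int), ([] : List (Int × Int))) (ih k hkst)]
    rw [hmapeq]
    have hsk : (PySem.List.max2? ((pvZA.getD j []).map (fun k => ((fun k => mVal S m k) k, k)))
        (·.1) (·.2)).getD (0, 0) = mBest (fun k => mVal S m k) j := rfl
    rw [hsk]
    have hpar : (mBest (fun k => mVal S m k) j).2 = mPar S m j := rfl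
    have hmem : mPar S m j ∈ pvStB := by
      rw [pvStB_eq]
      exact mBest_snd_mem (fun k => mVal S m k) j (pvStB_eq ▸ hj)
    rw [hpar, PySem.Dict.getD_of_get?_eq_some prev ((0 : Int), ([] : List (Int × Int))) (ih (mPar S m j) hmem)]
    simp only [mVal, mLst, pvCB_eq]

-- invariant of A's forward loop
theorem invA (S : List (List Int)) (m : Nat) : ∀ (r : Nat), r ≤ m → ∀ j ∈ pvStA,
    ((PySem.List.pyRange 1 ((m : Int) + 1) 1).foldl (pvRowA S) (pvV0A S)).get? ((r : Int), j) =
      some (mVal S r j, if r = 0 then none else some (mPar S (r - 1) j)) := by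
  induction m with
  | zero =>
    intro r hr j hj
    interval_cases r
    rw [show ((0 : Nat) : Int) + 1 = 1 by norm_num,
      PySem.List.pyRange_one_eq_nil le_rfl, List.foldl_nil]
    unfold pvV0A
    rw [show ((0 : Nat) : Int) = (0 : Int) by norm_num]
    rw [fold_get_new (fun j : Int => ((0 : Int), j)) (fun _ _ h => congrArg Prod.snd h)
      (fun j => (pvCA (PySem.List.pyGetD S 0 []) j, (none : Option Int))) pvStA PySem.Dict.empty j
      (by decide) hj]
    simp [mVal]
  | succ m ih =>
    intro r hr j hj
    have hsplit : PySem.List.pyRange 1 (((m + 1 : Nat) : Int) + 1) 1 =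
        PySem.List.pyRange 1 ((m : Int) + 1) 1 ++ [(m : Int) + 1] := by
      push_cast
      exact PySem.List.pyRange_one_succ_right (by omega)
    rw [hsplit, List.foldl_append, List.foldl_cons, List.foldl_nil]
    set prev := (PySem.List.pyRange 1 ((m : Int) + 1) 1).foldl (pvRowA S) (pvV0A S) with hprev
    rw [rowA_pure]
    rcases Nat.lt_or_ge r (m + 1) with hlt | hge
    · have hrm : r ≤ m := by omega
      rw [fold_get_stable (fun j : Int => ((m : Int) + 1, j))
        (fun j => pvEntA S prev ((m : Int) + 1) j) pvStA prev ((r : Int), j)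
        (fun j' _ h => by
          have : (r : Int) = (m : Int) + 1 := congrArg Prod.fst h
          omega)]
      exact ih r hrm j hj
    · have hrm : r = m + 1 := by omega
      subst hrm
      rw [show (((m + 1 : Nat) : Int), j) = ((fun j : Int => ((m : Int) + 1, j)) j) by push_cast; rfl]
      rw [fold_get_new (fun j : Int => ((m : Int) + 1, j)) (fun _ _ h => congrArg Prod.snd h)
        (fun j => pvEntA S prev ((m : Int) + 1) j) pvStA prev j (by decide) hj]
      simp only [pvEntA]
      simp only [show (m : Int) + 1 - 1 = (m : Int) from by ring]
      have hmapeq : (pvZA.getD j []).map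
          (fun k => ((prev.getD ((m : Int), k) ((0 : Int), (none : Option Int))).1, k)) =
          (pvZA.getD j []).map (fun k => ((fun k => mVal S m k) k, k)) := by
        refine List.map_congr_left (fun k hk => ?_)
        have hkst : k ∈ pvStA := (z_facts j hj).2 k hk
        rw [PySem.Dict.getD_of_get?_eq_some prev ((0 : Int), (none : Option Int)) (ih m le_rfl k hkst)]
      rw [hmapeq]
      have hsk : (PySem.List.max2? ((pvZA.getD j []).map (fun k => ((fun k => mVal S m k) k, k)))
          (·.1) (·.2)).getD (0, 0) = mBest (fun k => mVal S m k) j := rfl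
      rw [hsk]
      simp only [mVal, mPar, Nat.add_sub_cancel, Nat.succ_ne_zero, if_false]

-- the backward reconstruction of A walks cells row by row, columns descending
theorem cellsRev (a j : Int) (hj : j ∈ pvStA) (res0 : List (Int × Int)) :
    pvBits j a res0 = res0 ++ (pvCellsB a j).reverse := by
  unfold pvBits
  have h3 : PySem.List.pyRange 3 (-1) (-1) = [3, 2, 1, 0] := by decide
  have h4 : PySem.List.pyRange 0 4 1 = [0, 1, 2, 3] := by decide
  have hf : (([3, 2, 1, 0] : List Int).filter
        (fun jj => PySem.Int.band j (1 <<< jj.toNat) != 0)) =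
      ((([0, 1, 2, 3] : List Int).filter
        (fun k => PySem.Int.band (j >>> k.toNat) 1 != 0)).reverse) := by
    fin_cases hj <;> decide
  rw [h3, PySem.List.foldl_append_if, hf]
  unfold pvCellsB
  rw [h4]
  simp [List.map_reverse]

theorem recon (S : List (List Int)) (m : Nat) (v : PySem.Dict (Int × Int) (Int × Option Int))
    (hv : ∀ (r : Nat), r ≤ m → ∀ j ∈ pvStA,
      v.get? ((r : Int), j) = some (mVal S r j, if r = 0 then none else some (mPar S (r - 1) j))) :
    ∀ (i : Nat), i ≤ m → ∀ j ∈ pvStA, ∀ res0 : List (Int × Int),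
      (PySem.List.pyRange (i : Int) (-1) (-1)).foldl (pvReconA v) (res0, some j) =
        (res0 ++ (mLst S i j).reverse, none) := by
  intro i
  induction i with
  | zero =>
    intro _ j hj res0
    rw [show ((0 : Nat) : Int) = (0 : Int) by norm_num,
      show PySem.List.pyRange 0 (-1) (-1) = [0] from by decide, List.foldl_cons, List.foldl_nil]
    simp only [pvReconA, Option.getD_some]
    rw [cellsRev 0 j hj res0]
    rw [show ((0 : Int), j) = (((0 : Nat) : Int), j) from by norm_num,
      PySem.Dict.getD_of_get?_eq_some v ((0 : Int), (none : Option Int)) (hv 0 (Nat.zero_le m) j hj)]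
    simp [mLst]
  | succ i ihr =>
    intro hi j hj res0
    have hcons : PySem.List.pyRange ((i + 1 : Nat) : Int) (-1) (-1) =
        ((i : Int) + 1) :: PySem.List.pyRange (i : Int) (-1) (-1) := by
      have := PySem.List.pyRange_neg_one_cons (a := ((i + 1 : Nat) : Int)) (b := (-1 : Int))
        (by push_cast; omega)
      rw [this]
      push_cast
      norm_num
    rw [hcons, List.foldl_cons]
    have hstep : pvReconA v (res0, some j) ((i : Int) + 1) =
        (res0 ++ (pvCellsB ((i : Int) + 1) j).reverse, some (mPar S i j)) := by
      simp only [pvReconA, Option.getD_some]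
      rw [cellsRev ((i : Int) + 1) j hj res0]
      rw [show (((i : Int) + 1), j) = (((i + 1 : Nat) : Int), j) from by push_cast; rfl,
        PySem.Dict.getD_of_get?_eq_some v ((0 : Int), (none : Option Int)) (hv (i + 1) hi j hj)]
      simp
    rw [hstep]
    have hmem : mPar S i j ∈ pvStA := mBest_snd_mem (fun k => mVal S i k) j hj
    rw [ihr (by omega) (mPar S i j) hmem (res0 ++ (pvCellsB ((i : Int) + 1) j).reverse)]
    simp [mLst, List.reverse_append]

-- ===== VERDICT (by name: the statement is the Claim_ definition above) =====
theorem sahovnica_spec : Claim_equal_sahovnica := by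
  intro S _ hpre
  obtain ⟨hne, _⟩ := hpre
  have hlen0 : 0 < S.length := List.length_pos_iff.mpr hne
  set m := S.length - 1 with hm
  have hlen : (S.length : Int) = (m : Int) + 1 := by
    have h1 : S.length = m + 1 := by omega
    rw [h1]; push_cast; ring
  show sahovnica S = sahovnica_alt S
  have hA := invA S m
  have hB := invB S m
  simp only [sahovnica, sahovnica_alt, hlen,
    show (m : Int) + 1 - 1 = (m : Int) from by ring]
  set vA := (PySem.List.pyRange 1 ((m : Int) + 1) 1).foldl (pvRowA S) (pvV0A S) with hvA
  set vB := (PySem.List.pyRange 1 ((m : Int) + 1) 1).foldl (pvRowB S) (pvCur0B S) with hvB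
  have hmapA : pvStA.map (fun j => ((vA.getD ((m : Int), j) ((0 : Int), (none : Option Int))).1, j))
      = pvStA.map (fun j => ((fun j => mVal S m j) j, j)) :=
    List.map_congr_left (fun j hj => by
      rw [PySem.Dict.getD_of_get?_eq_some vA ((0 : Int), (none : Option Int)) (hA m le_rfl j hj)])
  have hmapB : pvStB.map (fun j => ((vB.getD j ((0 : Int), ([] : List (Int × Int)))).1, j))
      = pvStB.map (fun j => ((fun j => mVal S m j) j, j)) :=
    List.map_congr_left (fun j hj => by
      rw [PySem.Dict.getD_of_get?_eq_some vB ((0 : Int), ([] : List (Int × Int))) (hB j hj)])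
  rw [hmapA, hmapB, pvStB_eq]
  obtain ⟨jb, hjb, hmax⟩ := max2_map (fun j => mVal S m j) pvStA (by decide)
  rw [hmax]
  simp only [Option.getD_some]
  rw [recon S m vA hA m le_rfl jb hjb []]
  rw [PySem.Dict.getD_of_get?_eq_some vB ((0 : Int), ([] : List (Int × Int)))
    (hB jb (pvStB_eq ▸ hjb))]
  simp
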